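-- pv_equiv track=rewrite | github.com/pkkid/checkio | Home/sort_array_by_element_frequency.py | frequency_sort
-- ===== SOURCE A (Python) =====
-- from collections import defaultdict
--
-- def frequency_sort(items):
--     freq = defaultdict(lambda: (0, 9999))
--     for i, item in enumerate(items):
--         count, index = freq[item]
--         freq[item] = (count+1, min(index, i))
--     result = []
--     for k in sorted(freq.keys(), key=lambda k: (-freq[k][0], freq[k][1])):
--         result += [k] * freq[k][0]
--     return result
-- ===== SOURCE B (Python) =====
-- def frequency_sort(items):
--     # Sort the whole list directly: key = frequency (descending) then first
--     # occurrence (ascending), packed into a single integer since 0 <= first < n.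
--     n = len(items)
--     count = {}
--     first = {}
--     for i, x in enumerate(items):
--         count[x] = count.get(x, 0) + 1
--         if x not in first:
--             first[x] = i
--     return sorted(items, key=lambda x: first[x] - n * count[x])
-- ===== Notes on version B (the rewrite author's own statement) =====
-- stated objective: alternative
-- what changed: B sorts the whole input list once by a per-element key (frequency descending, first-occurrence index ascending, packed into one integer), instead of A's sorting of the distinct keys of a defaultdict followed by an expansion loop that replicates each key by its count.
import Mathlib
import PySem

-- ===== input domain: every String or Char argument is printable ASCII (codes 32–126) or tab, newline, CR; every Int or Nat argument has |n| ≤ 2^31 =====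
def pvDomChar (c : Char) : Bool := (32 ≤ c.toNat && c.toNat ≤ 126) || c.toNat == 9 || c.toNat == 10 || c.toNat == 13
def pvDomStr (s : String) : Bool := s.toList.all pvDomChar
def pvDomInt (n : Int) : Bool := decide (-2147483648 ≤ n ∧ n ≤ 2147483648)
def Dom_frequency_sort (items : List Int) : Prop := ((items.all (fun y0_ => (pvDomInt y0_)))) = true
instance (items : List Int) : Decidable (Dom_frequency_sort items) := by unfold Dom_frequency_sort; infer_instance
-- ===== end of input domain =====

-- B re-implements A by sorting the whole list once with a per-element key
-- (frequency descending, first-occurrence ascending) instead of sorting the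
-- distinct dict keys and expanding each by its count; same output, same cost.

-- ===== PORT A =====
-- the loop body: count, index = freq[item]; freq[item] = (count+1, min(index, i))
def pvAStep (d : PySem.Dict Int (Int × Int)) (p : Int × Int) : PySem.Dict Int (Int × Int) :=
  let ci := d.getD p.2 (0, 9999)
  d.insert p.2 (ci.1 + 1, min ci.2 p.1)

-- for i, item in enumerate(items): …
def pvAFreq (items : List Int) : PySem.Dict Int (Int × Int) :=
  (PySem.List.enumerate items 0).foldl pvAStep PySem.Dict.empty

def frequency_sort (items : List Int) : List Int :=
  let freq := pvAFreq items
  let ks := PySem.List.sorted2 freq.keys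
      (fun k => -(freq.getD k (0, 9999)).1) (fun k => (freq.getD k (0, 9999)).2) false
  ks.foldl (fun r k => r ++ PySem.List.pyRepeat [k] (freq.getD k (0, 9999)).1) []

-- ===== PORT B =====
-- the loop body: count[x] = count.get(x, 0) + 1; if x not in first: first[x] = i
def pvBStep (cf : PySem.Dict Int Int × PySem.Dict Int Int) (p : Int × Int) :
    PySem.Dict Int Int × PySem.Dict Int Int :=
  (cf.1.insert p.2 (cf.1.getD p.2 0 + 1),
   if cf.2.contains p.2 then cf.2 else cf.2.insert p.2 p.1)

def frequency_sort_alt (items : List Int) : List Int :=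
  let n : Int := items.length
  let cf := (PySem.List.enumerate items 0).foldl pvBStep (PySem.Dict.empty, PySem.Dict.empty)
  PySem.List.sorted items (fun x => cf.2.getD x 0 - n * cf.1.getD x 0) false

-- ===== PRECONDITION & SPEC =====
def Spec_frequency_sort (items : List Int) (out : List Int) : Prop := out = frequency_sort_alt items
instance (items : List Int) (out : List Int) : Decidable (Spec_frequency_sort items out) := by unfold Spec_frequency_sort; infer_instance

-- ===== CLAIM (what is proved, stated in full; the proofs are below) =====
def Claim_equal_frequency_sort : Prop := ∀ (items : List Int), Dom_frequency_sort items → Spec_frequency_sort items (frequency_sort items)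

-- ===== LEMMAS AND PROOFS =====

-- the intended per-element sort key: first occurrence minus n times the count
def pvKey (items : List Int) (x : Int) : Int :=
  (items.idxOf x : Int) - (items.length : Int) * (items.count x : Int)

-- ---- generic uniqueness: two key-ordered permutations of each other are equal ----
theorem pv_unique {α : Type} (R : α → α → Prop) (xs ys : List α)
    (hperm : xs.Perm ys) (hxs : xs.Pairwise R) (hys : ys.Pairwise R)
    (hanti : ∀ a ∈ xs, ∀ b ∈ xs, R a b → R b a → a = b) : xs = ys := by
  induction xs generalizing ys with
  | nil => exact hperm.nil_eq
  | cons a xs ih =>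
    cases ys with
    | nil => exact absurd hperm.symm.nil_eq (by simp)
    | cons b ys =>
      by_cases hab : a = b
      · subst hab
        rw [ih ys hperm.cons_inv (List.pairwise_cons.mp hxs).2 (List.pairwise_cons.mp hys).2
          (fun p hp q hq => hanti p (List.mem_cons_of_mem _ hp) q (List.mem_cons_of_mem _ hq))]
      · exfalso
        have ha' : a ∈ ys := by
          rcases List.mem_cons.mp (hperm.mem_iff.mp (List.mem_cons_self ..)) with h | h
          · exact absurd h hab
          · exact h
        have hb' : b ∈ xs := by
          rcases List.mem_cons.mp (hperm.mem_iff.mpr (List.mem_cons_self ..)) with h | h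
          · exact absurd h.symm hab
          · exact h
        have hRba : R b a := (List.pairwise_cons.mp hys).1 a ha'
        have hRab : R a b := (List.pairwise_cons.mp hxs).1 b hb'
        exact hab (hanti a (List.mem_cons_self ..) b (List.mem_cons_of_mem _ hb') hRab hRba)

-- ---- characterisation of A's frequency dict ----
theorem pvAFreq_getD (l : List Int) (s : Int) (d : PySem.Dict Int (Int × Int)) (x : Int) :
    ((PySem.List.enumerate l s).foldl pvAStep d).getD x (0, 9999)
      = if x ∈ l then
          ((d.getD x (0, 9999)).1 + (l.count x : Int),
           min (d.getD x (0, 9999)).2 (s + (l.idxOf x : Int)))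
        else d.getD x (0, 9999) := by
  induction l generalizing s d with
  | nil => simp [PySem.List.enumerate_nil]
  | cons y l ih =>
    rw [PySem.List.enumerate_cons, List.foldl_cons, ih]
    have hstep : ∀ z : Int, (pvAStep d (s, y)).getD z (0, 9999)
        = if z = y then ((d.getD y (0, 9999)).1 + 1, min (d.getD y (0, 9999)).2 s)
          else d.getD z (0, 9999) := by
      intro z
      simp [pvAStep, PySem.Dict.getD_insert]
    by_cases hxy : x = y
    · subst hxy
      by_cases hxl : x ∈ l
      · have h1 : min (min (d.getD x (0, 9999)).2 s) (s + 1 + (l.idxOf x : Int))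
            = min (d.getD x (0, 9999)).2 (s + (((x :: l).idxOf x : Int))) := by
          rw [List.idxOf_cons_self]
          push_cast
          omega
        simp only [hstep, if_pos hxl, if_pos (List.mem_cons_self ..)]
        rw [List.count_cons_self]
        push_cast
        rw [← h1]
        ring_nf
      · simp only [hstep, if_neg hxl, if_pos (List.mem_cons_self ..)]
        rw [List.idxOf_cons_self, List.count_cons_self, List.count_eq_zero.mpr hxl]
        push_cast
        ring_nf
    · simp only [hstep, if_neg hxy]
      by_cases hxl : x ∈ l
      · have hc : (y :: l).count x = l.count x := by
          simp only [List.count_cons, beq_iff_eq, if_neg (fun h : y = x => hxy h.symm)]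
          omega
        simp only [if_pos hxl, if_pos (List.mem_cons_of_mem _ hxl)]
        rw [hc, List.idxOf_cons_ne _ (fun h => hxy h.symm)]
        push_cast
        ring_nf
      · have : x ∉ y :: l := by simp [hxy, hxl]
        simp [hxl, this]

theorem pvAFreq_mem_keys (l : List Int) (s : Int) (d : PySem.Dict Int (Int × Int)) (x : Int) :
    x ∈ ((PySem.List.enumerate l s).foldl pvAStep d).keys ↔ x ∈ d.keys ∨ x ∈ l := by
  induction l generalizing s d with
  | nil => simp [PySem.List.enumerate_nil]
  | cons y l ih =>
    rw [PySem.List.enumerate_cons, List.foldl_cons, ih]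
    have hkeys : ∀ z : Int, z ∈ (pvAStep d (s, y)).keys ↔ z ∈ d.keys ∨ z = y := by
      intro z
      by_cases h : d.contains y
      · simp only [pvAStep]
        rw [PySem.Dict.keys_insert_of_contains _ _ h]
        constructor
        · exact Or.inl
        · rintro (hz | rfl)
          · exact hz
          · exact (PySem.Dict.contains_iff_mem_keys _ _).mp h
      · simp only [pvAStep]
        rw [PySem.Dict.keys_insert_of_not_contains _ _ (eq_false_of_ne_true h)]
        simp
    rw [hkeys]
    simp
    tauto

theorem pvAFreq_keys_pairwise (g : Int → Int) :
    ∀ (l : List Int) (s : Int) (d : PySem.Dict Int (Int × Int)),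
    d.keys.Pairwise (fun a b => g a < g b) →
    (∀ k ∈ d.keys, g k < s) →
    (∀ k, k ∈ l → k ∉ d.keys → g k = s + (l.idxOf k : Int)) →
    ((PySem.List.enumerate l s).foldl pvAStep d).keys.Pairwise (fun a b => g a < g b) := by
  intro l
  induction l with
  | nil =>
    intro s d h1 _ _
    simpa [PySem.List.enumerate_nil] using h1
  | cons y l ih =>
    intro s d h1 h2 h3
    rw [PySem.List.enumerate_cons, List.foldl_cons]
    by_cases hy : d.contains y
    · have hkeys : (pvAStep d (s, y)).keys = d.keys := by
        simp only [pvAStep]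
        exact PySem.Dict.keys_insert_of_contains _ _ hy
      apply ih (s + 1) (pvAStep d (s, y))
      · rw [hkeys]; exact h1
      · rw [hkeys]; intro k hk; have := h2 k hk; omega
      · rw [hkeys]
        intro k hkl hknot
        have hky : k ≠ y := by
          rintro rfl
          exact hknot ((PySem.Dict.contains_iff_mem_keys _ _).mp hy)
        have := h3 k (List.mem_cons_of_mem _ hkl) hknot
        rw [List.idxOf_cons_ne _ (fun h => hky h.symm)] at this
        push_cast at this ⊢
        omega
    · have hkeys : (pvAStep d (s, y)).keys = d.keys ++ [y] := by
        simp only [pvAStep]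
        exact PySem.Dict.keys_insert_of_not_contains _ _ (eq_false_of_ne_true hy)
      have hynot : y ∉ d.keys := fun h => hy ((PySem.Dict.contains_iff_mem_keys _ _).mpr h)
      have hgy : g y = s := by
        have := h3 y (List.mem_cons_self ..) hynot
        rw [List.idxOf_cons_self] at this
        push_cast at this
        omega
      apply ih (s + 1) (pvAStep d (s, y))
      · rw [hkeys]
        rw [List.pairwise_append]
        refine ⟨h1, List.pairwise_singleton _ _, ?_⟩
        intro a ha b hb
        rw [List.mem_singleton] at hb
        subst hb
        rw [hgy]
        exact h2 a ha
      · rw [hkeys]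
        intro k hk
        rcases List.mem_append.mp hk with hk | hk
        · have := h2 k hk; omega
        · rw [List.mem_singleton] at hk; subst hk; omega
      · rw [hkeys]
        intro k hkl hknot
        rw [List.mem_append, List.mem_singleton] at hknot
        push Not at hknot
        have := h3 k (List.mem_cons_of_mem _ hkl) hknot.1
        rw [List.idxOf_cons_ne _ (fun h => hknot.2 h.symm)] at this
        push_cast at this ⊢
        omega

-- ---- characterisation of B's two dicts ----
theorem pvBFold_split (l : List Int) (s : Int) (cf : PySem.Dict Int Int × PySem.Dict Int Int) :
    (PySem.List.enumerate l s).foldl pvBStep cf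
      = ((PySem.List.enumerate l s).foldl (fun c p => c.insert p.2 (c.getD p.2 0 + 1)) cf.1,
         (PySem.List.enumerate l s).foldl (fun f p => if f.contains p.2 then f else f.insert p.2 p.1) cf.2) := by
  induction l generalizing s cf with
  | nil => simp [PySem.List.enumerate_nil]
  | cons y l ih =>
    rw [PySem.List.enumerate_cons]
    simp only [List.foldl_cons]
    rw [ih]
    rfl

theorem pvBCount_getD (l : List Int) (s : Int) (c : PySem.Dict Int Int) (x : Int) :
    ((PySem.List.enumerate l s).foldl (fun c p => c.insert p.2 (c.getD p.2 0 + 1)) c).getD x 0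
      = c.getD x 0 + (l.count x : Int) := by
  induction l generalizing s c with
  | nil => simp [PySem.List.enumerate_nil]
  | cons y l ih =>
    rw [PySem.List.enumerate_cons, List.foldl_cons, ih]
    by_cases hxy : x = y
    · subst hxy
      rw [PySem.Dict.getD_insert_self, List.count_cons_self]
      push_cast
      ring
    · have hc : (y :: l).count x = l.count x := by
        simp only [List.count_cons, beq_iff_eq, if_neg (fun h : y = x => hxy h.symm)]
        omega
      rw [PySem.Dict.getD_insert_of_ne _ _ _ hxy, hc]

theorem pvBFirst_getD (l : List Int) (s : Int) (f : PySem.Dict Int Int) (x : Int) :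
    ((PySem.List.enumerate l s).foldl (fun f p => if f.contains p.2 then f else f.insert p.2 p.1) f).getD x 0
      = if f.contains x then f.getD x 0 else if x ∈ l then s + (l.idxOf x : Int) else 0 := by
  induction l generalizing s f with
  | nil =>
    simp only [PySem.List.enumerate_nil, List.foldl_nil, List.not_mem_nil, if_false]
    by_cases hx : f.contains x
    · rw [if_pos hx]
    · rw [if_neg hx]
      exact PySem.Dict.getD_of_not_contains _ _ (eq_false_of_ne_true hx)
  | cons y l ih =>
    rw [PySem.List.enumerate_cons, List.foldl_cons, ih]
    by_cases hy : f.contains y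
    · rw [if_pos hy]
      by_cases hx : f.contains x
      · rw [if_pos hx, if_pos hx]
      · rw [if_neg hx, if_neg hx]
        have hxy : x ≠ y := by rintro rfl; exact hx hy
        by_cases hxl : x ∈ l
        · rw [if_pos hxl, if_pos (List.mem_cons_of_mem _ hxl),
            List.idxOf_cons_ne _ (fun h => hxy h.symm)]
          push_cast
          ring
        · have : x ∉ y :: l := by simp [hxy, hxl]
          rw [if_neg hxl, if_neg this]
    · rw [if_neg hy]
      by_cases hx : f.contains x
      · have hxy : x ≠ y := by rintro rfl; exact hy hx
        have hx' : (f.insert y s).contains x = true := by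
          rw [PySem.Dict.contains_insert]
          simp [hx]
        rw [if_pos hx', if_pos hx, PySem.Dict.getD_insert_of_ne _ _ _ hxy]
      · by_cases hxy : x = y
        · subst hxy
          have hx' : (f.insert x s).contains x = true := by
            rw [PySem.Dict.contains_insert]
            simp
          rw [if_pos hx', if_neg hx, PySem.Dict.getD_insert_self,
            if_pos (List.mem_cons_self ..), List.idxOf_cons_self]
          push_cast
          ring
        · have hx' : (f.insert y s).contains x = false := by
            rw [PySem.Dict.contains_insert]
            simp [hx, hxy]
          rw [if_neg (by simp [hx']), if_neg hx]
          by_cases hxl : x ∈ l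
          · rw [if_pos hxl, if_pos (List.mem_cons_of_mem _ hxl),
              List.idxOf_cons_ne _ (fun h => hxy h.symm)]
            push_cast
            ring
          · have : x ∉ y :: l := by simp [hxy, hxl]
            rw [if_neg hxl, if_neg this]

-- ---- stability of the insertion sort, via index decoration ----
def pvBA (k1 k2 : Int → Int) (a b : Int) : Bool :=
  decide (k1 a < k1 b) || (!decide (k1 b < k1 a) && decide (k2 a < k2 b))

def pvDBA (k1 k2 : Int → Int) (p q : Int × Nat) : Bool :=
  pvBA k1 k2 p.1 q.1 || (!pvBA k1 k2 p.1 q.1 && !pvBA k1 k2 q.1 p.1 && decide (p.2 < q.2))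

def pvSLex (k1 k2 : Int → Int) (p q : Int × Nat) : Prop :=
  k1 p.1 < k1 q.1 ∨ (k1 p.1 = k1 q.1 ∧ (k2 p.1 < k2 q.1 ∨ (k2 p.1 = k2 q.1 ∧ p.2 < q.2)))

theorem pvDBA_true (k1 k2 : Int → Int) (p q : Int × Nat) :
    pvDBA k1 k2 p q = true ↔ pvSLex k1 k2 p q := by
  unfold pvDBA pvBA pvSLex
  by_cases h1 : k1 p.1 < k1 q.1 <;> by_cases h2 : k1 q.1 < k1 p.1 <;>
    by_cases h3 : k2 p.1 < k2 q.1 <;> by_cases h4 : k2 q.1 < k2 p.1 <;>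
    by_cases h5 : p.2 < q.2 <;> simp [h1, h2, h3, h4, h5] <;> omega

theorem pvDBA_false (k1 k2 : Int → Int) (p q : Int × Nat) (hne : p.2 ≠ q.2)
    (h : pvDBA k1 k2 p q = false) : pvSLex k1 k2 q p := by
  have h' : ¬ pvSLex k1 k2 p q := by
    rw [← pvDBA_true k1 k2 p q]
    simp [h]
  simp only [pvSLex] at h' ⊢
  push Not at h'
  omega

theorem pvSLex_trans (k1 k2 : Int → Int) (p q r : Int × Nat)
    (h1 : pvSLex k1 k2 p q) (h2 : pvSLex k1 k2 q r) : pvSLex k1 k2 p r := by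
  simp only [pvSLex] at h1 h2 ⊢
  omega

theorem pvInsertBy_map_fst (k1 k2 : Int → Int) (p : Int × Nat) :
    ∀ (acc : List (Int × Nat)), (∀ q ∈ acc, q.2 < p.2) →
    (PySem.List.insertBy (pvDBA k1 k2) p acc).map Prod.fst
      = PySem.List.insertBy (pvBA k1 k2) p.1 (acc.map Prod.fst) := by
  intro acc
  induction acc with
  | nil => intro _; simp [PySem.List.insertBy]
  | cons q acc ih =>
    intro hlt
    have hd : pvDBA k1 k2 p q = pvBA k1 k2 p.1 q.1 := by
      have : ¬ (p.2 < q.2) := by have := hlt q (List.mem_cons_self ..); omega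
      simp [pvDBA, this]
    simp only [PySem.List.insertBy, List.map_cons]
    rw [hd]
    cases hba : pvBA k1 k2 p.1 q.1 with
    | true => simp
    | false =>
      simp only [Bool.false_eq_true, if_false, List.map_cons]
      rw [ih (fun r hr => hlt r (List.mem_cons_of_mem _ hr))]

theorem pvInsertBy_pairwise (k1 k2 : Int → Int) (p : Int × Nat) :
    ∀ (acc : List (Int × Nat)), acc.Pairwise (pvSLex k1 k2) → (∀ q ∈ acc, q.2 ≠ p.2) →
    (PySem.List.insertBy (pvDBA k1 k2) p acc).Pairwise (pvSLex k1 k2) := by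
  intro acc
  induction acc with
  | nil => intro _ _; simp [PySem.List.insertBy]
  | cons q acc ih =>
    intro hpair hfresh
    have hq := List.pairwise_cons.mp hpair
    simp only [PySem.List.insertBy]
    cases hdq : pvDBA k1 k2 p q with
    | true =>
      simp only [if_true]
      rw [List.pairwise_cons]
      refine ⟨?_, hpair⟩
      intro z hz
      rcases List.mem_cons.mp hz with hzq | hz
      · rw [hzq]; exact (pvDBA_true k1 k2 p q).mp hdq
      · exact pvSLex_trans k1 k2 p q z ((pvDBA_true k1 k2 p q).mp hdq) (hq.1 z hz)
    | false =>
      simp only [Bool.false_eq_true, if_false]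
      rw [List.pairwise_cons]
      refine ⟨?_, ih hq.2 (fun r hr => hfresh r (List.mem_cons_of_mem _ hr))⟩
      intro z hz
      rcases (PySem.List.insertBy_mem_iff _ _ _ _).mp hz with hzp | hz
      · rw [hzp]
        exact pvDBA_false k1 k2 p q (fun h => hfresh q (List.mem_cons_self ..) h.symm) hdq
      · exact hq.1 z hz

def pvDSort (k1 k2 : Int → Int) (K : List Int) : List (Int × Nat) :=
  (K.zipIdx).foldl (fun acc p => PySem.List.insertBy (pvDBA k1 k2) p acc) []

theorem pvDSort_perm (k1 k2 : Int → Int) (K : List Int) :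
    (pvDSort k1 k2 K).Perm K.zipIdx := by
  simpa using PySem.List.foldl_insertBy_perm (pvDBA k1 k2) K.zipIdx []

theorem pvDSort_map_fst (k1 k2 : Int → Int) (K : List Int) :
    (pvDSort k1 k2 K).map Prod.fst = PySem.List.sorted2 K k1 k2 false := by
  have h : ∀ (L : List Int), (pvDSort k1 k2 L).map Prod.fst
      = L.foldl (fun acc x => PySem.List.insertBy (pvBA k1 k2) x acc) [] := by
    intro L
    induction L using List.reverseRecOn with
    | nil => simp [pvDSort]
    | append_singleton K y ih =>
      have hz : (K ++ [y]).zipIdx = K.zipIdx ++ [(y, K.length)] := by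
        rw [List.zipIdx_append, List.zipIdx_singleton]
        simp
      have hstep : pvDSort k1 k2 (K ++ [y])
          = PySem.List.insertBy (pvDBA k1 k2) (y, K.length) (pvDSort k1 k2 K) := by
        unfold pvDSort
        rw [hz, List.foldl_append, List.foldl_cons, List.foldl_nil]
      rw [hstep, List.foldl_append, List.foldl_cons, List.foldl_nil]
      rw [pvInsertBy_map_fst k1 k2 (y, K.length) (pvDSort k1 k2 K) ?_]
      · rw [ih]
      · intro q hq
        have hq' := (pvDSort_perm k1 k2 K).mem_iff.mp hq
        have := List.mem_zipIdx (show (q.1, q.2) ∈ K.zipIdx 0 from by simpa using hq')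
        omega
  exact (h K).trans rfl

theorem pvDSort_pairwise (k1 k2 : Int → Int) (K : List Int) :
    (pvDSort k1 k2 K).Pairwise (pvSLex k1 k2) := by
  induction K using List.reverseRecOn with
  | nil => simp [pvDSort]
  | append_singleton K y ih =>
    have hz : (K ++ [y]).zipIdx = K.zipIdx ++ [(y, K.length)] := by
      rw [List.zipIdx_append, List.zipIdx_singleton]
      simp
    have hstep : pvDSort k1 k2 (K ++ [y])
        = PySem.List.insertBy (pvDBA k1 k2) (y, K.length) (pvDSort k1 k2 K) := by
      unfold pvDSort
      rw [hz, List.foldl_append, List.foldl_cons, List.foldl_nil]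
    rw [hstep]
    apply pvInsertBy_pairwise k1 k2 (y, K.length) (pvDSort k1 k2 K) ih
    intro q hq
    have hq' := (pvDSort_perm k1 k2 K).mem_iff.mp hq
    have := List.mem_zipIdx (show (q.1, q.2) ∈ K.zipIdx 0 from by simpa using hq')
    omega

-- ---- assembling the A side ----
theorem pv_flatMap_replicate_perm :
    ∀ (K : List Int) (items : List Int), K.Nodup → (∀ x, x ∈ K ↔ x ∈ items) →
    (K.flatMap fun k => List.replicate (items.count k) k).Perm items := by
  intro K items hnd hmem
  rw [List.perm_iff_count]
  intro x
  have hcnt : ∀ (L : List Int), L.Nodup →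
      (L.flatMap fun k => List.replicate (items.count k) k).count x
        = if x ∈ L then items.count x else 0 := by
    intro L
    induction L with
    | nil => simp
    | cons k L ihL =>
      intro hndL
      rw [List.flatMap_cons, List.count_append, ihL hndL.of_cons]
      by_cases hxk : x = k
      · subst hxk
        have hxL : x ∉ L := (List.nodup_cons.mp hndL).1
        simp [hxL]
      · simp [List.count_replicate, Ne.symm hxk, hxk]
  rw [hcnt K hnd]
  by_cases hx : x ∈ items
  · rw [if_pos ((hmem x).mpr hx)]
  · rw [if_neg (fun h => hx ((hmem x).mp h)), List.count_eq_zero.mpr hx]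

theorem pv_pairwise_flatMap_replicate (key : Int → Int) (m : Int → Nat) :
    ∀ (ks : List Int), ks.Pairwise (fun a b => key a < key b) →
    (ks.flatMap fun k => List.replicate (m k) k).Pairwise (fun a b => key a ≤ key b) := by
  intro ks
  induction ks with
  | nil => simp
  | cons k ks ih =>
    intro hp
    have hk := List.pairwise_cons.mp hp
    rw [List.flatMap_cons, List.pairwise_append]
    refine ⟨?_, ih hk.2, ?_⟩
    · rw [List.pairwise_replicate]
      exact Or.inr le_rfl
    · intro a ha b hb
      rw [List.eq_of_mem_replicate ha]
      rcases List.mem_flatMap.mp hb with ⟨k', hk', hb'⟩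
      rw [List.eq_of_mem_replicate hb']
      exact le_of_lt (hk.1 k' hk')

-- flatMap congruence on members
theorem pv_flatMap_congr {α β : Type} (f g : α → List β) :
    ∀ (l : List α), (∀ x ∈ l, f x = g x) → l.flatMap f = l.flatMap g := by
  intro l
  induction l with
  | nil => intro _; rfl
  | cons x l ih =>
    intro h
    rw [List.flatMap_cons, List.flatMap_cons, h x (List.mem_cons_self ..),
      ih (fun z hz => h z (List.mem_cons_of_mem _ hz))]

-- ---- main equality ----
theorem pv_main (items : List Int) : frequency_sort items = frequency_sort_alt items := by
  -- A-side dictionary facts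
  have hgetD : ∀ x ∈ items, (pvAFreq items).getD x (0, 9999)
      = ((items.count x : Int), min 9999 (items.idxOf x : Int)) := by
    intro x hx
    unfold pvAFreq
    rw [pvAFreq_getD items 0 PySem.Dict.empty x, if_pos hx, PySem.Dict.getD_empty]
    simp
  have hKmem : ∀ x, x ∈ (pvAFreq items).keys ↔ x ∈ items := by
    intro x
    unfold pvAFreq
    rw [pvAFreq_mem_keys]
    simp [PySem.Dict.keys_empty]
  have hK3 : (pvAFreq items).keys.Pairwise
      (fun a b => (items.idxOf a : Int) < (items.idxOf b : Int)) := by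
    unfold pvAFreq
    apply pvAFreq_keys_pairwise (fun k => (items.idxOf k : Int)) items 0 PySem.Dict.empty
    · simp [PySem.Dict.keys_empty]
    · simp [PySem.Dict.keys_empty]
    · intro k _ _
      simp
  have hKnodup : (pvAFreq items).keys.Nodup := by
    refine hK3.imp ?_
    intro a b h
    rintro rfl
    exact absurd h (lt_irrefl _)
  -- bounds for members
  have hidx : ∀ x ∈ items, 0 ≤ (items.idxOf x : Int) ∧ (items.idxOf x : Int) < (items.length : Int) := by
    intro x hx
    have := List.idxOf_lt_length_of_mem hx
    constructor
    · exact Int.natCast_nonneg _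
    · exact_mod_cast this
  have hcnt1 : ∀ x ∈ items, 1 ≤ (items.count x : Int) := by
    intro x hx
    have : 0 < items.count x := List.count_pos_iff.mpr hx
    exact_mod_cast this
  -- the sorted distinct keys
  have hskmem : ∀ k, k ∈ PySem.List.sorted2 (pvAFreq items).keys
      (fun k => -((pvAFreq items).getD k (0, 9999)).1)
      (fun k => ((pvAFreq items).getD k (0, 9999)).2) false ↔ k ∈ items := by
    intro k
    rw [(PySem.List.sorted2_perm _ _ _ _).mem_iff, hKmem]
  have hsknodup : (PySem.List.sorted2 (pvAFreq items).keys
      (fun k => -((pvAFreq items).getD k (0, 9999)).1)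
      (fun k => ((pvAFreq items).getD k (0, 9999)).2) false).Nodup :=
    ((PySem.List.sorted2_perm _ _ _ _).nodup_iff).mpr hKnodup
  have hskpw : (PySem.List.sorted2 (pvAFreq items).keys
      (fun k => -((pvAFreq items).getD k (0, 9999)).1)
      (fun k => ((pvAFreq items).getD k (0, 9999)).2) false).Pairwise
      (fun a b => pvKey items a < pvKey items b) := by
    rw [← pvDSort_map_fst, List.pairwise_map]
    refine (pvDSort_pairwise _ _ _).imp_of_mem ?_
    intro p q hp hq hS
    have hp' := (pvDSort_perm _ _ _).mem_iff.mp hp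
    have hq' := (pvDSort_perm _ _ _).mem_iff.mp hq
    obtain ⟨-, hplt, hpe⟩ := List.mem_zipIdx
      (show (p.1, p.2) ∈ (pvAFreq items).keys.zipIdx 0 from by simpa using hp')
    obtain ⟨-, hqlt, hqe⟩ := List.mem_zipIdx
      (show (q.1, q.2) ∈ (pvAFreq items).keys.zipIdx 0 from by simpa using hq')
    simp only [Nat.zero_add, Nat.sub_zero] at hplt hpe hqlt hqe
    have hpK : p.1 ∈ (pvAFreq items).keys := by rw [hpe]; exact List.getElem_mem _
    have hqK : q.1 ∈ (pvAFreq items).keys := by rw [hqe]; exact List.getElem_mem _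
    have hpi : p.1 ∈ items := (hKmem _).mp hpK
    have hqi : q.1 ∈ items := (hKmem _).mp hqK
    have hia := hidx p.1 hpi
    have hib := hidx q.1 hqi
    have hca := hcnt1 p.1 hpi
    have hcb := hcnt1 q.1 hqi
    simp only [pvSLex] at hS
    rw [hgetD p.1 hpi, hgetD q.1 hqi] at hS
    simp only [neg_lt_neg_iff, neg_inj] at hS
    -- reduce to: count q.1 < count p.1, or equal counts and idxOf p.1 < idxOf q.1
    have hred : ((items.count q.1 : Int) < (items.count p.1 : Int)) ∨
        ((items.count p.1 : Int) = (items.count q.1 : Int) ∧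
         (items.idxOf p.1 : Int) < (items.idxOf q.1 : Int)) := by
      rcases hS with h | ⟨h1, h2⟩
      · left; exact h
      · right
        refine ⟨h1, ?_⟩
        rcases h2 with h2 | ⟨h2, h3⟩
        · omega
        · -- tie on the capped index: use the first-occurrence order of the keys
          have := List.pairwise_iff_getElem.mp hK3 p.2 q.2 hplt hqlt h3
          rw [← hpe, ← hqe] at this
          exact this
    unfold pvKey
    rcases hred with h | ⟨h1, h2⟩
    · have hmul : (items.length : Int) * 1
          ≤ (items.length : Int) * ((items.count p.1 : Int) - (items.count q.1 : Int)) := by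
        apply mul_le_mul_of_nonneg_left
        · omega
        · exact Int.natCast_nonneg _
      nlinarith [hia.1, hia.2, hib.1, hib.2]
    · rw [h1]
      linarith
  -- the shape of A's result
  have hAform : frequency_sort items
      = (PySem.List.sorted2 (pvAFreq items).keys
          (fun k => -((pvAFreq items).getD k (0, 9999)).1)
          (fun k => ((pvAFreq items).getD k (0, 9999)).2) false).flatMap
        (fun k => List.replicate (items.count k) k) := by
    show (PySem.List.sorted2 (pvAFreq items).keys
          (fun k => -((pvAFreq items).getD k (0, 9999)).1)
          (fun k => ((pvAFreq items).getD k (0, 9999)).2) false).foldl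
        (fun r k => r ++ PySem.List.pyRepeat [k] ((pvAFreq items).getD k (0, 9999)).1) [] = _
    rw [PySem.List.foldl_append_eq_flatMap, List.nil_append]
    apply pv_flatMap_congr
    intro k hk
    have hki : k ∈ items := (hskmem k).mp hk
    rw [PySem.List.pyRepeat_singleton, hgetD k hki]
    simp
  have hAperm : (frequency_sort items).Perm items := by
    rw [hAform]
    exact pv_flatMap_replicate_perm _ items hsknodup hskmem
  have hApw : (frequency_sort items).Pairwise
      (fun a b => pvKey items a ≤ pvKey items b) := by
    rw [hAform]
    exact pv_pairwise_flatMap_replicate _ _ _ hskpw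
  -- the shape of B's result
  have hBform : frequency_sort_alt items = PySem.List.sorted items (fun x =>
      ((PySem.List.enumerate items 0).foldl pvBStep (PySem.Dict.empty, PySem.Dict.empty)).2.getD x 0
        - (items.length : Int) *
          ((PySem.List.enumerate items 0).foldl pvBStep (PySem.Dict.empty, PySem.Dict.empty)).1.getD x 0) false := rfl
  have hkeyB : ∀ x ∈ items,
      ((PySem.List.enumerate items 0).foldl pvBStep (PySem.Dict.empty, PySem.Dict.empty)).2.getD x 0
        - (items.length : Int) *
          ((PySem.List.enumerate items 0).foldl pvBStep (PySem.Dict.empty, PySem.Dict.empty)).1.getD x 0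
      = pvKey items x := by
    intro x hx
    rw [pvBFold_split]
    simp only []
    rw [pvBCount_getD, pvBFirst_getD]
    simp [PySem.Dict.contains_empty, PySem.Dict.getD_empty, hx, pvKey]
  have hBperm : (frequency_sort_alt items).Perm items := by
    rw [hBform]
    exact PySem.List.sorted_perm _ _ _
  have hBpw : (frequency_sort_alt items).Pairwise
      (fun a b => pvKey items a ≤ pvKey items b) := by
    rw [hBform]
    refine (PySem.List.sorted_pairwise items _).imp_of_mem ?_
    intro a b ha hb h
    have ha' : a ∈ items := (PySem.List.sorted_perm _ _ _).mem_iff.mp ha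
    have hb' : b ∈ items := (PySem.List.sorted_perm _ _ _).mem_iff.mp hb
    rw [hkeyB a ha', hkeyB b hb'] at h
    exact h
  -- key is injective on members, so the two key-sorted permutations coincide
  have hanti : ∀ a ∈ items, ∀ b ∈ items,
      pvKey items a ≤ pvKey items b → pvKey items b ≤ pvKey items a → a = b := by
    intro a ha b hb h1 h2
    have he : pvKey items a = pvKey items b := le_antisymm h1 h2
    have hia := hidx a ha
    have hib := hidx b hb
    have hca := hcnt1 a ha
    have hcb := hcnt1 b hb
    have hfe : items.idxOf a = items.idxOf b := by
      have hfe' : (items.idxOf a : Int) = (items.idxOf b : Int) := by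
        unfold pvKey at he
        rcases lt_trichotomy ((items.count a : Int)) ((items.count b : Int)) with h | h | h
        · exfalso
          have hmul : (items.length : Int) * 1
              ≤ (items.length : Int) * ((items.count b : Int) - (items.count a : Int)) := by
            apply mul_le_mul_of_nonneg_left
            · omega
            · exact Int.natCast_nonneg _
          nlinarith [hia.1, hia.2, hib.1, hib.2]
        · rw [h] at he
          linarith
        · exfalso
          have hmul : (items.length : Int) * 1
              ≤ (items.length : Int) * ((items.count a : Int) - (items.count b : Int)) := by
            apply mul_le_mul_of_nonneg_left
            · omega
            · exact Int.natCast_nonneg _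
          nlinarith [hia.1, hia.2, hib.1, hib.2]
      exact_mod_cast hfe'
    calc a = items[items.idxOf a]'(List.idxOf_lt_length_of_mem ha) :=
          (List.getElem_idxOf (List.idxOf_lt_length_of_mem ha)).symm
      _ = items[items.idxOf b]'(List.idxOf_lt_length_of_mem hb) := by
          simp only [hfe]
      _ = b := List.getElem_idxOf (List.idxOf_lt_length_of_mem hb)
  exact pv_unique (fun a b => pvKey items a ≤ pvKey items b)
    (frequency_sort items) (frequency_sort_alt items)
    (hAperm.trans hBperm.symm) hApw hBpw
    (fun a ha b hb => hanti a (hAperm.mem_iff.mp ha) b (hAperm.mem_iff.mp hb))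

-- ===== VERDICT (by name: the statement is the Claim_ definition above) =====
theorem frequency_sort_spec : Claim_equal_frequency_sort := by
  intro items _
  exact pv_main items
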